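-- pv_equiv track=rewrite | github.com/ArvinCS/thesis | offchain/python/stack_based_proof_generator.py | encode_bitmap
-- ===== SOURCE A (Python) =====
-- def encode_bitmap(operations):
--     """Convert list of operations (1=push, 0=merge) to bitmap format."""
--     bitmap = []
--     current_word = 0
--     bit_position = 0
--
--     for op in operations:
--         if op == 1:
--             current_word |= (1 << bit_position)
--         bit_position += 1
--
--         if bit_position == 256:
--             bitmap.append(current_word)
--             current_word = 0
--             bit_position = 0
--
--     if bit_position > 0:
--         bitmap.append(current_word)
--
--     return bitmap
-- ===== SOURCE B (Python) =====
-- def encode_bitmap(operations):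
--     """Convert list of operations (1=push, 0=merge) to bitmap format."""
--     bitmap = []
--     for i in range(0, len(operations), 256):
--         chunk = operations[i:i+256]
--         word = sum(1 << j for j, op in enumerate(chunk) if op == 1)
--         bitmap.append(word)
--     return bitmap
-- ===== Notes on version B (the rewrite author's own statement) =====
-- stated objective: simpler
-- what changed: Replaces the flat pass with a running bit_position counter, inline 256-boundary flush and trailing partial-word guard by iteration over independent 256-element chunks, each chunk's word computed in one shot as a sum of shifted bits.
import Mathlib
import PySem

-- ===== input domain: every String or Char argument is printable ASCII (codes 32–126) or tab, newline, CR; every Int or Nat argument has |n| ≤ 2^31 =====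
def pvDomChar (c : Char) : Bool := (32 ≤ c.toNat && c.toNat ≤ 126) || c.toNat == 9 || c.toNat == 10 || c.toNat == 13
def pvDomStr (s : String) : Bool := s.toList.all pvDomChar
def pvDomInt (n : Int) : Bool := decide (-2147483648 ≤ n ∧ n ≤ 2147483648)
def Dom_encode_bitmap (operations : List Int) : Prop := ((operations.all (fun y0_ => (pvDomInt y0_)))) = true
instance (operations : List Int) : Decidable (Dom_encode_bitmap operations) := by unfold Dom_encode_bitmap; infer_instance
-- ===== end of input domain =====

-- B replaces A's flat pass (running bit_position counter, inline flush at 256, trailing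
-- partial-word guard) by iteration over independent 256-element chunks, computing each
-- chunk's word in one shot as a sum of shifted bits; objective: simpler.

-- ===== PORT A =====
-- loop body of A; bit_position is a nonnegative counter (values 0..255 here), tracked as
-- Nat so that Python's '1 << bit_position' is exactly '(1 : Int) <<< bit_position'
def pvStepA (st : List Int × Int × Nat) (op : Int) : List Int × Int × Nat :=
  let bitmap := st.1
  let current_word := if op = 1 then PySem.Int.bor st.2.1 ((1 : Int) <<< st.2.2) else st.2.1
  let bit_position := st.2.2 + 1
  if bit_position = 256 then (bitmap ++ [current_word], 0, 0)
  else (bitmap, current_word, bit_position)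

def encode_bitmap (operations : List Int) : List Int :=
  let st := operations.foldl pvStepA ([], 0, 0)
  if st.2.2 > 0 then st.1 ++ [st.2.1] else st.1

-- ===== PORT B =====
-- word of one chunk: sum(1 << j for j, op in enumerate(chunk) if op == 1);
-- j from enumerate is a nonnegative Int, so '1 << j' is exactly '(1 : Int) <<< j.toNat'
def pvWordB (chunk : List Int) : Int :=
  (PySem.List.enumerate chunk).foldl
    (fun (s : Int) (jop : Int × Int) =>
      if jop.2 = 1 then s + ((1 : Int) <<< jop.1.toNat) else s) 0

def encode_bitmap_alt (operations : List Int) : List Int :=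
  (PySem.List.pyRange 0 (operations.length : Int) 256).foldl
    (fun bitmap i =>
      let chunk := PySem.List.slice operations (some i) (some (i + 256))
      bitmap ++ [pvWordB chunk])
    []

-- ===== PRECONDITION & SPEC =====
def Spec_encode_bitmap (operations : List Int) (out : List Int) : Prop := out = encode_bitmap_alt operations
instance (operations : List Int) (out : List Int) : Decidable (Spec_encode_bitmap operations out) := by unfold Spec_encode_bitmap; infer_instance

-- ===== CLAIM (what is proved, stated in full; the proofs are below) =====
def Claim_equal_encode_bitmap : Prop := ∀ (operations : List Int), Dom_encode_bitmap operations → Spec_encode_bitmap operations (encode_bitmap operations)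

-- ===== LEMMAS AND PROOFS =====

-- sum of the set bits of a chunk, the bit for element j weighted 2^(p+j)
def pvSumB : List Int → Nat → Int
  | [], _ => 0
  | op :: rest, p => (if op = 1 then (2 : Int) ^ p else 0) + pvSumB rest (p + 1)

-- common reference shape: A's word/position recursion with OR replaced by addition
def pvChunks : List Int → Int → Nat → List Int
  | [], w, p => if 0 < p then [w] else []
  | op :: rest, w, p =>
    let w' := if op = 1 then w + (2 : Int) ^ p else w
    if p + 1 = 256 then w' :: pvChunks rest 0 0 else pvChunks rest w' (p + 1)

lemma pv_or_nat (a p : Nat) (h : a < 2 ^ p) : a ||| 2 ^ p = a + 2 ^ p := by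
  apply Nat.eq_of_testBit_eq
  intro j
  rw [Nat.testBit_lor]
  rcases lt_trichotomy j p with hj | rfl | hj
  · rw [Nat.add_comm, Nat.testBit_two_pow_add_gt hj, Nat.testBit_two_pow_of_ne (by omega),
      Bool.or_false]
  · have ha : a.testBit j = false := Nat.testBit_lt_two_pow h
    rw [Nat.add_comm, Nat.testBit_two_pow_add_eq, ha, Nat.testBit_two_pow_self]
    simp
  · have h1 : a + 2 ^ p < 2 ^ j := by
      have : 2 ^ (p + 1) ≤ 2 ^ j := Nat.pow_le_pow_right (by omega) (by omega)
      have := Nat.pow_succ 2 p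
      omega
    have ha : a.testBit j = false := Nat.testBit_lt_two_pow (by
      have : 2 ^ p ≤ 2 ^ j := Nat.pow_le_pow_right (by omega) (by omega); omega)
    rw [Nat.testBit_lt_two_pow h1, ha, Nat.testBit_two_pow_of_ne (by omega)]
    simp

lemma pv_bor (w : Int) (p : Nat) (h0 : 0 ≤ w) (h1 : w < 2 ^ p) :
    PySem.Int.bor w ((1 : Int) <<< p) = w + 2 ^ p := by
  have hs : (1 : Int) <<< p = 2 ^ p := by rw [Int.shiftLeft_eq, one_mul]
  have hw : w = ((w.toNat : Nat) : Int) := (Int.toNat_of_nonneg h0).symm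
  rw [hs, hw]
  have hcast : ((2 : Int) ^ p) = (((2 ^ p : Nat) : Int)) := by push_cast; ring
  rw [hcast, PySem.Int.bor_natCast]
  rw [pv_or_nat w.toNat p (by omega)]
  push_cast
  ring

-- A's loop, started at any accumulator / word / position, finishes to acc ++ pvChunks ops w p
lemma pv_A_loop : ∀ (ops acc : List Int) (w : Int) (p : Nat), p < 256 → 0 ≤ w → w < 2 ^ p →
    (if (ops.foldl pvStepA (acc, w, p)).2.2 > 0
      then (ops.foldl pvStepA (acc, w, p)).1 ++ [(ops.foldl pvStepA (acc, w, p)).2.1]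
      else (ops.foldl pvStepA (acc, w, p)).1)
      = acc ++ pvChunks ops w p := by
  intro ops
  induction ops with
  | nil =>
    intro acc w p hp h0 h1
    simp only [List.foldl_nil, pvChunks]
    split <;> simp_all
  | cons op rest ih =>
    intro acc w p hp h0 h1
    simp only [List.foldl_cons]
    by_cases hop : op = 1
    · have hw' : PySem.Int.bor w ((1 : Int) <<< p) = w + 2 ^ p := pv_bor w p h0 h1
      by_cases h256 : p + 1 = 256
      · have hstep : pvStepA (acc, w, p) op = (acc ++ [w + 2 ^ p], 0, 0) := by
          simp [pvStepA, hop, hw', h256]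
        rw [hstep, ih (acc ++ [w + 2 ^ p]) 0 0 (by omega) le_rfl (by norm_num)]
        simp [pvChunks, hop, h256, List.append_assoc]
      · have hstep : pvStepA (acc, w, p) op = (acc, w + 2 ^ p, p + 1) := by
          simp [pvStepA, hop, hw', h256]
        rw [hstep, ih acc (w + 2 ^ p) (p + 1) (by omega)
          (by positivity) (by rw [pow_succ]; omega)]
        simp [pvChunks, hop, h256]
    · by_cases h256 : p + 1 = 256
      · have hstep : pvStepA (acc, w, p) op = (acc ++ [w], 0, 0) := by
          simp [pvStepA, hop, h256]
        rw [hstep, ih (acc ++ [w]) 0 0 (by omega) le_rfl (by norm_num)]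
        simp [pvChunks, hop, h256, List.append_assoc]
      · have hstep : pvStepA (acc, w, p) op = (acc, w, p + 1) := by
          simp [pvStepA, hop, h256]
        rw [hstep, ih acc w (p + 1) (by omega) h0 (by rw [pow_succ]; omega)]
        simp [pvChunks, hop, h256]

lemma pv_word_sum : ∀ (chunk : List Int) (p : Nat) (s : Int),
    (PySem.List.enumerate chunk ((p : Nat) : Int)).foldl
      (fun (s : Int) (jop : Int × Int) =>
        if jop.2 = 1 then s + ((1 : Int) <<< jop.1.toNat) else s) s
      = s + pvSumB chunk p := by
  intro chunk
  induction chunk with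
  | nil => intro p s; simp [PySem.List.enumerate_nil, pvSumB]
  | cons op rest ih =>
    intro p s
    simp only [PySem.List.enumerate_cons, List.foldl_cons]
    have hc : ((p : Nat) : Int) + 1 = (((p + 1 : Nat)) : Int) := by push_cast; ring
    have ht : (((p : Nat) : Int)).toNat = p := Int.toNat_natCast p
    rw [hc, ht, ih (p + 1)]
    have hs : (1 : Int) <<< p = 2 ^ p := by rw [Int.shiftLeft_eq, one_mul]
    simp only [pvSumB]
    split <;> simp [hs] <;> ring_nf

lemma pv_wordB_eq (chunk : List Int) : pvWordB chunk = pvSumB chunk 0 := by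
  have h := pv_word_sum chunk 0 0
  simp only [Nat.cast_zero, zero_add] at h
  exact h

-- a full 256-bit chunk flushes: pvChunks over chunk ++ rest emits one word then restarts
lemma pv_chunks_full : ∀ (chunk rest : List Int) (w : Int) (p : Nat),
    p < 256 → chunk.length + p = 256 →
    pvChunks (chunk ++ rest) w p = (w + pvSumB chunk p) :: pvChunks rest 0 0 := by
  intro chunk
  induction chunk with
  | nil => intro rest w p hp hlen; simp at hlen; omega
  | cons op chunk' ih =>
    intro rest w p hp hlen
    simp only [List.length_cons] at hlen
    simp only [List.cons_append, pvChunks]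
    by_cases h256 : p + 1 = 256
    · have hc : chunk' = [] := by
        have : chunk'.length = 0 := by omega
        exact List.eq_nil_of_length_eq_zero this
      subst hc
      simp only [List.nil_append, if_pos h256, pvSumB]
      split <;> ring_nf
    · rw [if_neg h256, ih rest _ (p + 1) (by omega) (by omega)]
      simp only [pvSumB]
      split <;> ring_nf

-- a short trailing chunk (possibly empty) emits its word iff it is nonempty or p > 0
lemma pv_chunks_short : ∀ (chunk : List Int) (w : Int) (p : Nat),
    chunk.length + p < 256 →
    pvChunks chunk w p = if chunk.length = 0 ∧ p = 0 then [] else [w + pvSumB chunk p] := by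
  intro chunk
  induction chunk with
  | nil =>
    intro w p _
    simp only [pvChunks, pvSumB, List.length_nil]
    rcases Nat.eq_zero_or_pos p with h | h
    · simp [h]
    · rw [if_pos h, if_neg (by omega)]
      ring_nf
  | cons op chunk' ih =>
    intro w p hlen
    simp only [List.length_cons] at hlen
    simp only [pvChunks]
    rw [if_neg (by omega : ¬ p + 1 = 256), ih _ (p + 1) (by omega),
      if_neg (by omega : ¬ (chunk'.length = 0 ∧ p + 1 = 0)),
      if_neg (by simp : ¬ ((op :: chunk').length = 0 ∧ p = 0))]
    simp only [pvSumB]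
    split <;> ring_nf

-- B unrolled: the range/slice fold is a map of chunk words over take/drop chunks
lemma pv_alt_eq_map (ops : List Int) :
    encode_bitmap_alt ops
      = (List.range ((((ops.length : Int)) + 255) / 256).toNat).map
          (fun k => pvWordB ((ops.drop (256 * k)).take 256)) := by
  unfold encode_bitmap_alt
  rw [PySem.List.pyRange_of_pos 0 (ops.length : Int) (by norm_num)]
  have hcount : (if (0 : Int) < (ops.length : Int)
      then (((ops.length : Int) - 0 + 256 - 1) / 256).toNat else 0)
      = (((ops.length : Int) + 255) / 256).toNat := by
    split <;> omega
  rw [hcount, PySem.List.foldl_append_singleton_eq_map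
    (fun i => pvWordB (PySem.List.slice ops (some i) (some (i + 256)))), List.map_map,
    List.nil_append]
  apply List.map_congr_left
  intro k _
  show pvWordB (PySem.List.slice ops (some (0 + 256 * (k : Int)))
      (some (0 + 256 * (k : Int) + 256))) = _
  have h1 : (0 + 256 * (k : Int)) = (((256 * k : Nat)) : Int) := by push_cast; ring
  have h2 : (0 + 256 * (k : Int) + 256) = (((256 * k : Nat)) : Int) + ((256 : Nat) : Int) := by
    push_cast; ring
  rw [h2, h1, PySem.List.slice_natCast_add]

lemma pv_B_chunks (ops : List Int) : encode_bitmap_alt ops = pvChunks ops 0 0 := by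
  have key : ∀ (n : Nat) (ops : List Int), ops.length ≤ n →
      encode_bitmap_alt ops = pvChunks ops 0 0 := by
    intro n
    induction n with
    | zero =>
      intro ops h
      have : ops = [] := List.eq_nil_of_length_eq_zero (by omega)
      subst this
      rw [pv_alt_eq_map]
      simp [pvChunks]
    | succ n ih =>
      intro ops h
      by_cases hops : ops = []
      · subst hops
        rw [pv_alt_eq_map]
        simp [pvChunks]
      · have hlen : 0 < ops.length := List.length_pos_of_ne_nil hops
        rw [pv_alt_eq_map]
        have hm : ((((ops.length : Int)) + 255) / 256).toNat
            = (((((ops.drop 256).length : Int)) + 255) / 256).toNat + 1 := by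
          simp only [List.length_drop]; omega
        rw [hm, List.range_succ_eq_map, List.map_cons, List.map_map]
        have htail : (List.range (((((ops.drop 256).length : Int)) + 255) / 256).toNat).map
            ((fun k => pvWordB ((ops.drop (256 * k)).take 256)) ∘ Nat.succ)
            = pvChunks (ops.drop 256) 0 0 := by
          rw [← ih (ops.drop 256) (by rw [List.length_drop]; omega), pv_alt_eq_map]
          apply List.map_congr_left
          intro k _
          have hidx : (ops.drop 256).drop (256 * k) = ops.drop (256 * Nat.succ k) := by
            rw [List.drop_drop]; congr 1; omega
          simp only [Function.comp_apply, hidx]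
        rw [htail]
        simp only [Nat.mul_zero, List.drop_zero]
        by_cases h256 : 256 ≤ ops.length
        · conv_rhs => rw [← List.take_append_drop 256 ops]
          rw [pv_chunks_full _ _ 0 0 (by norm_num)
            (by rw [List.length_take]; omega)]
          rw [pv_wordB_eq, zero_add]
        · rw [List.drop_eq_nil_of_le (by omega)]
          rw [pv_chunks_short ops 0 0 (by omega), if_neg (by omega),
            List.take_of_length_le (by omega), pv_wordB_eq, zero_add]
          simp [pvChunks]
  exact key ops.length ops le_rfl

-- ===== VERDICT (by name: the statement is the Claim_ definition above) =====
theorem encode_bitmap_spec : Claim_equal_encode_bitmap := by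
  intro operations _
  unfold Spec_encode_bitmap encode_bitmap
  rw [pv_B_chunks]
  have h := pv_A_loop operations [] 0 0 (by norm_num) le_rfl (by norm_num)
  simpa using h
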